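-- pv_equiv track=rewrite | github.com/eggsacc/CS1010X-2025 | Practical exam/PE 2023/template.py | subtree_distance
-- ===== SOURCE A (Python) =====
-- def subtree_distance(tree):
--     def helper(node):
--         max = -1
--         for i in range(len(tree)):
--             if(tree[i] == node):
--                 result = 1 + helper(i)
--                 if result > max:
--                     max = result
--         if(max != -1):
--             return max
--         else:
--             return 0
--
--     ret = []
--     for i in range(len(tree)):
--         ret.append(helper(i))
--     return ret
-- ===== SOURCE B (Python) =====
-- def subtree_distance(tree):
--     # Bottom-up relaxation: n rounds of a single pass pushing each node's
--     # truncated height to its parent; after n rounds every height is exact.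
--     n = len(tree)
--     h = [0] * n
--     for _ in range(n):
--         new = [0] * n
--         for j in range(n):
--             p = tree[j]
--             if 0 <= p < n:
--                 if h[j] + 1 > new[p]:
--                     new[p] = h[j] + 1
--         h = new
--     return h
-- ===== Notes on version B (the rewrite author's own statement) =====
-- stated objective: alternative
-- what changed: Replaces A's per-node recursive child-scan (which re-explores every subtree from every node) with n rounds of a single non-recursive bottom-up relaxation pass pushing each node's truncated height to its parent; it trades recursion for fixed-count iteration over an array of heights.
import Mathlib
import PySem

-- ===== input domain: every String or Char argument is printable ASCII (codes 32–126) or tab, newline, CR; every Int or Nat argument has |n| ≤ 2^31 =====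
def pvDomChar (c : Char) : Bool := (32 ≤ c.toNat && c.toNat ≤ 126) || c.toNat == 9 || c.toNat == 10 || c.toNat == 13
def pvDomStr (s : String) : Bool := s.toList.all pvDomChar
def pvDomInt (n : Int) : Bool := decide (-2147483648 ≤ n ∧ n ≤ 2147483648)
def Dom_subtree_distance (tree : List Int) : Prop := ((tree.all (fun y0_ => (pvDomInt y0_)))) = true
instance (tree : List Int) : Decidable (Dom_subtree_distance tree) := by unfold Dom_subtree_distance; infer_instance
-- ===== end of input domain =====

-- B replaces A's per-node recursive child-scanning (re-exploring every subtree from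
-- every root) by n rounds of a single non-recursive pass that pushes each node's
-- truncated height to its parent (a different, iteration-based algorithm).

-- ===== PORT A =====
-- Python's unbounded recursion is made total with a fuel argument (tree.length is
-- always enough fuel on the acyclic inputs Pre_ admits; fuel 0 returns 0).
def helperA (tree : List Int) : Nat → Int → Int
  | 0, _ => 0
  | f + 1, node =>
    -- max = -1; for i in range(len(tree)): if tree[i] == node: result = 1+helper(i); if result > max: max = result
    let m := (List.range tree.length).foldl (fun m i =>
      if tree.getD i 0 = node then
        (if 1 + helperA tree f ((i : Int)) > m then 1 + helperA tree f ((i : Int)) else m)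
      else m) (-1)
    if m ≠ -1 then m else 0

def subtree_distance (tree : List Int) : List Int :=
  (List.range tree.length).foldl
    (fun (ret : List Int) (i : Nat) => ret ++ [helperA tree tree.length (i : Int)]) []

-- ===== PORT B =====
-- one round: new = [0]*n; for j in range(n): p = tree[j]; if 0<=p<n: if h[j]+1 > new[p]: new[p] = h[j]+1
def roundB (tree h : List Int) : List Int :=
  (List.range tree.length).foldl (fun acc j =>
    let p := tree.getD j 0
    if 0 ≤ p ∧ p < (tree.length : Int) then
      (if h.getD j 0 + 1 > acc.getD p.toNat 0 then acc.set p.toNat (h.getD j 0 + 1) else acc)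
    else acc) (List.replicate tree.length 0)

def subtree_distance_alt (tree : List Int) : List Int :=
  (List.range tree.length).foldl (fun h _ => roundB tree h) (List.replicate tree.length 0)

-- ===== PRECONDITION & SPEC =====
-- one upward step in the parent-pointer graph: in-range nodes go to their parent, others stay put
def parentStep (tree : List Int) (p : Int) : Int :=
  if 0 ≤ p ∧ p < (tree.length : Int) then tree.getD p.toNat 0 else p

-- Pre_ = the parent-pointer graph is acyclic: from every node, following parents leaves the
-- index range within tree.length steps (by pigeonhole this is exactly acyclicity). On cyclic
-- inputs the Python A recurses forever (RecursionError), so they lie outside Pre_.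
def Pre_subtree_distance (tree : List Int) : Prop :=
  ∀ i < tree.length,
    ¬ (0 ≤ (parentStep tree)^[tree.length] (i : Int) ∧
       (parentStep tree)^[tree.length] (i : Int) < (tree.length : Int))
instance (tree : List Int) : Decidable (Pre_subtree_distance tree) := by
  unfold Pre_subtree_distance; infer_instance
def pvWitness_subtree_distance : List Int := [-1, 0, 0, 1]

def Spec_subtree_distance (tree : List Int) (out : List Int) : Prop := out = subtree_distance_alt tree
instance (tree : List Int) (out : List Int) : Decidable (Spec_subtree_distance tree out) := by unfold Spec_subtree_distance; infer_instance

-- ===== CLAIM (what is proved, stated in full; the proofs are below) =====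
def Claim_equal_subtree_distance : Prop := ∀ (tree : List Int), Dom_subtree_distance tree → Pre_subtree_distance tree → Spec_subtree_distance tree (subtree_distance tree)

-- ===== LEMMAS AND PROOFS =====

theorem helperA_nonneg (tree : List Int) : ∀ (f : Nat) (node : Int), 0 ≤ helperA tree f node := by
  intro f
  induction f with
  | zero => intro node; simp [helperA]
  | succ f ih =>
    intro node
    have key : ∀ (L : List Nat) (m : Int), -1 ≤ m →
        -1 ≤ L.foldl (fun m i =>
          if tree.getD i 0 = node then
            (if 1 + helperA tree f (i : Int) > m then 1 + helperA tree f (i : Int) else m)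
          else m) m := by
      intro L
      induction L with
      | nil => intro m hm; simpa using hm
      | cons j L ihL =>
        intro m hm
        simp only [List.foldl_cons]
        apply ihL
        have := ih (j : Int)
        split_ifs <;> omega
    simp only [helperA]
    have h1 := key (List.range tree.length) (-1) (by omega)
    split_ifs with h <;> omega

theorem roundB_step_length (tree h acc : List Int) (j : Nat) (hacc : acc.length = tree.length) :
    ((fun acc j =>
      let p := tree.getD j 0
      if 0 ≤ p ∧ p < (tree.length : Int) then
        (if h.getD j 0 + 1 > acc.getD p.toNat 0 then acc.set p.toNat (h.getD j 0 + 1) else acc)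
      else acc) acc j : List Int).length = tree.length := by
  simp only []
  split_ifs <;> simp [hacc]

theorem roundB_fold_length (tree h : List Int) : ∀ (L : List Nat) (acc : List Int), acc.length = tree.length →
    (L.foldl (fun acc j =>
      let p := tree.getD j 0
      if 0 ≤ p ∧ p < (tree.length : Int) then
        (if h.getD j 0 + 1 > acc.getD p.toNat 0 then acc.set p.toNat (h.getD j 0 + 1) else acc)
      else acc) acc).length = tree.length := by
  intro L
  induction L with
  | nil => intro acc hacc; simpa using hacc
  | cons j L ihL =>
    intro acc hacc
    simp only [List.foldl_cons]
    exact ihL _ (roundB_step_length tree h acc j hacc)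

theorem roundB_length (tree h : List Int) : (roundB tree h).length = tree.length := by
  unfold roundB
  exact roundB_fold_length tree h _ _ (by simp)

-- pointwise description of one round of B
theorem roundB_getD (tree h : List Int) (i : Nat) (hi : i < tree.length) :
    (roundB tree h).getD i 0 =
      (List.range tree.length).foldl (fun a j =>
        if tree.getD j 0 = (i : Int) then
          (if h.getD j 0 + 1 > a then h.getD j 0 + 1 else a)
        else a) 0 := by
  unfold roundB
  have key : ∀ (L : List Nat) (acc : List Int), acc.length = tree.length →
      (L.foldl (fun acc j =>
        let p := tree.getD j 0
        if 0 ≤ p ∧ p < (tree.length : Int) then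
          (if h.getD j 0 + 1 > acc.getD p.toNat 0 then acc.set p.toNat (h.getD j 0 + 1) else acc)
        else acc) acc).getD i 0 =
      L.foldl (fun a j =>
        if tree.getD j 0 = (i : Int) then
          (if h.getD j 0 + 1 > a then h.getD j 0 + 1 else a)
        else a) (acc.getD i 0) := by
    intro L
    induction L with
    | nil => intro acc hacc; simp
    | cons j L ihL =>
      intro acc hacc
      simp only [List.foldl_cons]
      rw [ihL _ (roundB_step_length tree h acc j hacc)]
      congr 1
      simp only []
      by_cases hp : 0 ≤ tree.getD j 0 ∧ tree.getD j 0 < (tree.length : Int)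
      · rw [if_pos hp]
        by_cases hpi : tree.getD j 0 = (i : Int)
        · have hnat : (tree.getD j 0).toNat = i := by omega
          rw [if_pos hpi, hnat]
          split_ifs with hgt
          · simp [List.getD_eq_getElem?_getD, hacc, hi]
          · rfl
        · have hnat : (tree.getD j 0).toNat ≠ i := by omega
          rw [if_neg hpi]
          split_ifs with hgt
          · generalize hK : (tree.getD j 0).toNat = k at hnat ⊢
            simp [List.getD_eq_getElem?_getD, List.getElem?_set_ne hnat]
          · rfl
      · have hpi : tree.getD j 0 ≠ (i : Int) := by
          intro hc; exact hp (by constructor <;> omega)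
        rw [if_neg hp, if_neg hpi]
  rw [key _ _ (by simp)]
  congr 1
  simp [List.getD_eq_getElem?_getD, hi]

-- cross lemma: A's sentinel fold (start -1) and B's pure fold (start 0) stay related
theorem fold_rel (tree : List Int) (f : Nat) (node : Int)
    (hnn : ∀ j : Int, 0 ≤ helperA tree f j) :
    ∀ (L : List Nat) (m a : Int), (m = -1 ∧ a = 0) ∨ (m = a ∧ 1 ≤ m) →
      (L.foldl (fun m i =>
          if tree.getD i 0 = node then
            (if 1 + helperA tree f (i : Int) > m then 1 + helperA tree f (i : Int) else m)
          else m) m = -1 ∧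
       L.foldl (fun a j =>
          if tree.getD j 0 = node then
            (if helperA tree f (j : Int) + 1 > a then helperA tree f (j : Int) + 1 else a)
          else a) a = 0) ∨
      (L.foldl (fun m i =>
          if tree.getD i 0 = node then
            (if 1 + helperA tree f (i : Int) > m then 1 + helperA tree f (i : Int) else m)
          else m) m =
       L.foldl (fun a j =>
          if tree.getD j 0 = node then
            (if helperA tree f (j : Int) + 1 > a then helperA tree f (j : Int) + 1 else a)
          else a) a ∧
       1 ≤ L.foldl (fun m i =>
          if tree.getD i 0 = node then
            (if 1 + helperA tree f (i : Int) > m then 1 + helperA tree f (i : Int) else m)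
          else m) m) := by
  intro L
  induction L with
  | nil =>
    intro m a hma
    simpa using hma
  | cons j L ihL =>
    intro m a hma
    simp only [List.foldl_cons]
    apply ihL
    have hv := hnn (j : Int)
    by_cases hj : tree.getD j 0 = node
    · rw [if_pos hj, if_pos hj]
      rcases hma with ⟨hm, ha⟩ | ⟨hm, ha⟩ <;> subst hm <;> split_ifs <;> omega
    · rw [if_neg hj, if_neg hj]
      exact hma

-- the iterated rounds of B compute exactly A's fueled helper, pointwise
theorem iter_eq_helper (tree : List Int) : ∀ (f : Nat),
    ((List.range f).foldl (fun h _ => roundB tree h) (List.replicate tree.length 0)).length = tree.length ∧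
    ∀ i < tree.length,
      ((List.range f).foldl (fun h _ => roundB tree h) (List.replicate tree.length 0)).getD i 0 =
        helperA tree f (i : Int) := by
  intro f
  induction f with
  | zero =>
    refine ⟨by simp, ?_⟩
    intro i hi
    simp [helperA, List.getD_eq_getElem?_getD, hi]
  | succ f ih =>
    obtain ⟨ihlen, ihpt⟩ := ih
    rw [List.range_succ, List.foldl_append]
    simp only [List.foldl_cons, List.foldl_nil]
    refine ⟨roundB_length _ _, ?_⟩
    intro i hi
    rw [roundB_getD _ _ _ hi]
    have hfold :
        (List.range tree.length).foldl (fun a j =>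
          if tree.getD j 0 = (i : Int) then
            (if ((List.range f).foldl (fun h _ => roundB tree h) (List.replicate tree.length 0)).getD j 0 + 1 > a
             then ((List.range f).foldl (fun h _ => roundB tree h) (List.replicate tree.length 0)).getD j 0 + 1 else a)
          else a) 0 =
        (List.range tree.length).foldl (fun a j =>
          if tree.getD j 0 = (i : Int) then
            (if helperA tree f (j : Int) + 1 > a then helperA tree f (j : Int) + 1 else a)
          else a) 0 := by
      apply PySem.List.foldl_congr_mem
      intro a j hj
      rw [ihpt j (List.mem_range.mp hj)]
    rw [hfold]
    simp only [helperA]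
    rcases fold_rel tree f (i : Int) (fun j => helperA_nonneg tree f j)
      (List.range tree.length) (-1) 0 (Or.inl ⟨rfl, rfl⟩) with ⟨h1, h2⟩ | ⟨h1, h2⟩
    · rw [h2, h1]
      simp
    · rw [← h1, if_pos (by omega)]

-- A's output is the map of the fueled helper
theorem subtree_distance_eq_map (tree : List Int) :
    subtree_distance tree = (List.range tree.length).map (fun (i : Nat) => helperA tree tree.length (i : Int)) := by
  unfold subtree_distance
  have key : ∀ (L : List Nat) (acc : List Int),
      L.foldl (fun (ret : List Int) (i : Nat) => ret ++ [helperA tree tree.length (i : Int)]) acc =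
      acc ++ L.map (fun (i : Nat) => helperA tree tree.length (i : Int)) := by
    intro L
    induction L with
    | nil => intro acc; simp
    | cons j L ihL => intro acc; rw [List.foldl_cons, ihL, List.map_cons]; simp
  simpa using key (List.range tree.length) []

theorem subtree_distance_eq_alt (tree : List Int) :
    subtree_distance tree = subtree_distance_alt tree := by
  obtain ⟨hlen, hpt⟩ := iter_eq_helper tree tree.length
  rw [subtree_distance_eq_map]
  unfold subtree_distance_alt
  apply List.ext_getElem
  · simpa using hlen.symm
  · intro i h1 h2
    have hi : i < tree.length := by simpa using h1
    have hg := hpt i hi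
    rw [List.getD_eq_getElem?_getD, List.getElem?_eq_getElem h2, Option.getD_some] at hg
    simp [List.getElem_map, List.getElem_range, hg]

-- ===== VERDICT (by name: the statement is the Claim_ definition above) =====
theorem subtree_distance_spec : Claim_equal_subtree_distance := by
  intro tree _ _
  unfold Spec_subtree_distance
  exact subtree_distance_eq_alt tree
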